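-- pv_equiv track=rewrite | github.com/Rejean-McCormick/SemantiK_Architect | morphology/slavic.py | _apply_suffix_rules
-- ===== SOURCE A (Python) =====
-- from typing import Dict, Any
--
-- def _apply_suffix_rules(word: str, rules: Any) -> str:
--     """
--     Apply the first matching suffix replacement rule to `word`.
--
--     Rules are expected to be a list of dicts:
--     [{ "ends_with": "...", "replace_with": "..." }, ...]
--     """
--     if not isinstance(rules, list):
--         return word
--
--     # Match longer endings first to avoid "tel" vs "el" type conflicts
--     sorted_rules = sorted(
--         rules,
--         key=lambda r: len(r.get("ends_with", "")),
--         reverse=True,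
--     )
--
--     for rule in sorted_rules:
--         end = rule.get("ends_with", "")
--         repl = rule.get("replace_with", "")
--         if end and word.endswith(end):
--             stem = word[:-len(end)]
--             return stem + repl
--
--     return word
-- ===== SOURCE B (Python) =====
-- def _apply_suffix_rules(word: str, rules) -> str:
--     """Longest-match suffix rewrite via a suffix table instead of sorting the rules."""
--     if not isinstance(rules, list):
--         return word
--
--     table = {}
--     for rule in rules:
--         end = rule.get("ends_with", "")
--         if end and end not in table:
--             table[end] = rule.get("replace_with", "")
--
--     limit = min(len(word), max(map(len, table), default=0))
--     for k in range(limit, 0, -1):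
--         suffix = word[-k:]
--         if suffix in table:
--             return word[:-k] + table[suffix]
--
--     return word
-- ===== Notes on version B (the rewrite author's own statement) =====
-- stated objective: alternative
-- what changed: B replaces A's sort-all-rules-by-suffix-length-then-scan with a first-occurrence suffix lookup table probed once per candidate suffix of the word, from longest to shortest.
import Mathlib
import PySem

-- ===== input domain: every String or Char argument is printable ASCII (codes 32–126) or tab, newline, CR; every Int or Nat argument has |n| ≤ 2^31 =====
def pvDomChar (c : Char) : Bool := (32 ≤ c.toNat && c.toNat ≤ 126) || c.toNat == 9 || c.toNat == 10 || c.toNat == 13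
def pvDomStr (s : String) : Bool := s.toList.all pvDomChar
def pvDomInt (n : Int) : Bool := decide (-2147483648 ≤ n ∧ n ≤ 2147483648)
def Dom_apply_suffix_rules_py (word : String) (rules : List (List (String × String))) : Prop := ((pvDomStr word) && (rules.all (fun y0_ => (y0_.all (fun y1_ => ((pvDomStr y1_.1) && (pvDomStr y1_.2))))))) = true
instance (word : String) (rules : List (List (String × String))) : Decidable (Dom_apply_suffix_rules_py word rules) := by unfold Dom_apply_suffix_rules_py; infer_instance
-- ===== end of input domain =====

-- B replaces A's sort-all-rules-then-scan by a suffix lookup table consulted for the word's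
-- suffixes from longest to shortest (objective: alternative / idiomatic longest-match lookup).

-- shared primitive: Python's `rule.get(k, dflt)` on a dict given as an association list
def ruleGet (r : List (String × String)) (k dflt : String) : String :=
  PySem.Dict.getD ⟨r⟩ k dflt

-- shared primitive: Python's `s + t` on strings
def pyConcat (s t : String) : String := String.ofList (s.toList ++ t.toList)

-- ===== PORT A =====
def applyLoopA (word : String) : List (List (String × String)) → String
  | [] => word
  | rule :: rest =>
    let e := ruleGet rule "ends_with" ""
    let repl := ruleGet rule "replace_with" ""
    if e ≠ "" ∧ PySem.Str.endswith word e = true then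
      pyConcat (PySem.Str.slice word none (some (-(PySem.Str.len e)))) repl
    else applyLoopA word rest

def apply_suffix_rules_py (word : String) (rules : List (List (String × String))) : String :=
  let sorted_rules := PySem.List.sorted rules
    (fun r => PySem.Str.len (ruleGet r "ends_with" "")) true
  applyLoopA word sorted_rules

-- ===== PORT B =====
def tableStep (table : PySem.Dict String String) (rule : List (String × String)) :
    PySem.Dict String String :=
  let e := ruleGet rule "ends_with" ""
  if e ≠ "" ∧ table.contains e = false then
    table.insert e (ruleGet rule "replace_with" "")
  else table

def loopB (word : String) (table : PySem.Dict String String) : Nat → String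
  | 0 => word
  | k + 1 =>
    let suffix := PySem.Str.slice word (some (-((k + 1 : Nat) : Int))) none
    match table.get? suffix with
    | some repl => pyConcat (PySem.Str.slice word none (some (-((k + 1 : Nat) : Int)))) repl
    | none => loopB word table k

def apply_suffix_rules_py_alt (word : String) (rules : List (List (String × String))) : String :=
  let table := rules.foldl tableStep PySem.Dict.empty
  let maxlen : Int :=
    match PySem.List.max? (table.keys.map PySem.Str.len) (fun x => x) with
    | some v => v
    | none => 0
  let limit : Int := min (PySem.Str.len word) maxlen
  loopB word table limit.toNat

-- ===== PRECONDITION & SPEC =====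
def Spec_apply_suffix_rules_py (word : String) (rules : List (List (String × String))) (out : String) : Prop := out = apply_suffix_rules_py_alt word rules
instance (word : String) (rules : List (List (String × String))) (out : String) : Decidable (Spec_apply_suffix_rules_py word rules out) := by unfold Spec_apply_suffix_rules_py; infer_instance

-- ===== CLAIM (what is proved, stated in full; the proofs are below) =====
def Claim_equal_apply_suffix_rules_py : Prop := ∀ (word : String) (rules : List (List (String × String))), Dom_apply_suffix_rules_py word rules → Spec_apply_suffix_rules_py word rules (apply_suffix_rules_py word rules)

-- ===== LEMMAS AND PROOFS =====

-- proof-side abbreviations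
def eOf (r : List (String × String)) : String := ruleGet r "ends_with" ""
def repOf (r : List (String × String)) : String := ruleGet r "replace_with" ""
def keyI (r : List (String × String)) : Int := PySem.Str.len (eOf r)
def predB (word : String) (r : List (String × String)) : Bool :=
  decide (eOf r ≠ "" ∧ PySem.Str.endswith word (eOf r) = true)

-- A's scan loop is a find? over the sorted list
theorem loopA_eq_find (word : String) (l : List (List (String × String))) :
    applyLoopA word l =
      match l.find? (predB word) with
      | some r => pyConcat (PySem.Str.slice word none (some (-(PySem.Str.len (eOf r))))) (repOf r)
      | none => word := by
  induction l with
  | nil => rfl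
  | cons r rest ih =>
    simp only [applyLoopA, List.find?_cons]
    by_cases h : eOf r ≠ "" ∧ PySem.Str.endswith word (eOf r) = true
    · have hp : predB word r = true := by
        simp only [predB, decide_eq_true_eq]
        exact h
      rw [hp]
      simp only [eOf] at h
      rw [if_pos h]
      rfl
    · have hp : predB word r = false := by
        simp only [predB, decide_eq_false_iff_not]
        exact h
      rw [hp]
      simp only [eOf] at h
      rw [if_neg h]
      exact ih


-- find? through a filter that covers the predicate
theorem find?_eq_find?_filter {α : Type} (p c : α → Bool) (l : List α)
    (h : ∀ x, p x = true → c x = true) :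
    l.find? p = (l.filter c).find? p := by
  induction l with
  | nil => rfl
  | cons x xs ih =>
    by_cases hp : p x = true
    · simp [List.find?_cons, List.filter_cons, hp, h x hp]
    · by_cases hc : c x = true <;>
        simp [List.find?_cons, List.filter_cons, hp, hc, ih]


-- on a descending list, the first p-element has the maximal key among p-elements
theorem find?_eq_find?_max {α : Type} (p : α → Bool) (key : α → Int) (m : Int)
    (l : List α) (hp : l.Pairwise (fun a b => key b ≤ key a))
    (hle : ∀ x ∈ l, p x = true → key x ≤ m) :
    (∃ x ∈ l, p x = true ∧ key x = m) →
    l.find? p = l.find? (fun x => p x && (key x == m)) := by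
  induction l with
  | nil => intro _; rfl
  | cons x xs ih =>
    intro hex
    rw [List.pairwise_cons] at hp
    by_cases hpx : p x = true
    · have hxm : key x = m := by
        refine le_antisymm (hle x List.mem_cons_self hpx) ?_
        obtain ⟨y, hy, hpy, hky⟩ := hex
        rcases List.mem_cons.mp hy with rfl | hy'
        · omega
        · have := hp.1 y hy'
          omega
      simp [List.find?_cons, hpx, hxm]
    · simp only [List.find?_cons, hpx, Bool.false_and, cond_false]
      apply ih hp.2 (fun z hz hpz => hle z (List.mem_cons_of_mem _ hz) hpz)
      obtain ⟨y, hy, hpy, hky⟩ := hex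
      rcases List.mem_cons.mp hy with rfl | hy'
      · exact absurd hpy hpx
      · exact ⟨y, hy', hpy, hky⟩


-- insertBy preserves descending order
theorem insertBy_pairwise {α : Type} (key : α → Int) (x : α) (acc : List α)
    (h : acc.Pairwise (fun a b => key b ≤ key a)) :
    (PySem.List.insertBy (fun a b => decide (key b < key a)) x acc).Pairwise
      (fun a b => key b ≤ key a) := by
  induction acc with
  | nil => simp [PySem.List.insertBy]
  | cons y ys ih =>
    rw [List.pairwise_cons] at h
    by_cases hb : key y < key x
    · simp only [PySem.List.insertBy, hb, decide_true, if_pos]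
      refine List.pairwise_cons.mpr ⟨?_, List.pairwise_cons.mpr ⟨h.1, h.2⟩⟩
      intro z hz
      rcases List.mem_cons.mp hz with rfl | hz'
      · omega
      · have := h.1 z hz'
        omega
    · simp only [PySem.List.insertBy, hb, decide_false, Bool.false_eq_true, if_neg,
        not_false_iff]
      refine List.pairwise_cons.mpr ⟨?_, ih h.2⟩
      intro z hz
      rcases (PySem.List.mem_insertBy _ _ _ _).mp hz with rfl | hz'
      · omega
      · exact h.1 z hz'


-- stability: the equal-key class is appended at its end
theorem filter_insertBy {α : Type} (key : α → Int) (m : Int) (x : α) (acc : List α)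
    (h : acc.Pairwise (fun a b => key b ≤ key a)) :
    (PySem.List.insertBy (fun a b => decide (key b < key a)) x acc).filter
        (fun y => key y == m) =
      acc.filter (fun y => key y == m) ++ [x].filter (fun y => key y == m) := by
  induction acc with
  | nil => simp [PySem.List.insertBy]
  | cons y ys ih =>
    rw [List.pairwise_cons] at h
    by_cases hb : key y < key x
    · simp only [PySem.List.insertBy, hb, decide_true, if_pos]
      by_cases hxm : key x = m
      · have hnil : (y :: ys).filter (fun z => key z == m) = [] := by
          rw [List.filter_eq_nil_iff]
          intro z hz
          rcases List.mem_cons.mp hz with rfl | hz'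
          · simp only [beq_iff_eq]
            omega
          · have := h.1 z hz'
            simp only [beq_iff_eq]
            omega
        simp [List.filter_cons, hxm, hnil]
      · have hbx : (key x == m) = false := by simp [hxm]
        simp [List.filter_cons, hbx]
    · simp only [PySem.List.insertBy, hb, decide_false, Bool.false_eq_true, if_neg,
        not_false_iff]
      rw [List.filter_cons, List.filter_cons, ih h.2]
      by_cases hym : (key y == m) = true <;> simp [hym]


theorem filter_sorted_rev {α : Type} (key : α → Int) (m : Int) (xs : List α) :
    (PySem.List.sorted xs key true).filter (fun y => key y == m) =
      xs.filter (fun y => key y == m) := by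
  rw [PySem.List.sorted_rev_eq_foldl_insertBy]
  have aux : ∀ (l acc : List α),
      acc.Pairwise (fun a b => key b ≤ key a) →
      (l.foldl (fun acc x => PySem.List.insertBy (fun a b => decide (key b < key a)) x acc)
          acc).filter (fun y => key y == m) =
        acc.filter (fun y => key y == m) ++ l.filter (fun y => key y == m) := by
    intro l
    induction l with
    | nil =>
      intro acc _
      simp
    | cons x t ih =>
      intro acc hacc
      simp only [List.foldl_cons]
      rw [ih _ (insertBy_pairwise key x acc hacc), filter_insertBy key m x acc hacc]
      rw [List.filter_cons]
      by_cases hxm : (key x == m) = true <;> simp [hxm]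
  simpa using aux xs [] (by simp)


-- B's table lookup is the first rule with that (nonempty) suffix
theorem table_get? (rules : List (List (String × String))) (acc : PySem.Dict String String)
    (s : String) (hs : s ≠ "") :
    ((rules.foldl tableStep acc).get? s) =
      match acc.get? s with
      | some v => some v
      | none => (rules.find? (fun r => eOf r == s)).map repOf := by
  have hstep : ∀ (t : PySem.Dict String String) (r : List (String × String)),
      tableStep t r =
        if eOf r ≠ "" ∧ t.contains (eOf r) = false then t.insert (eOf r) (repOf r) else t :=
    fun _ _ => rfl
  induction rules generalizing acc with
  | nil =>
    simp only [List.foldl_nil, List.find?_nil, Option.map_none]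
    cases acc.get? s <;> rfl
  | cons r rest ih =>
    simp only [List.foldl_cons, List.find?_cons]
    rw [ih (tableStep acc r)]
    by_cases he : eOf r = s
    · have hb : (eOf r == s) = true := by simp [he]
      rw [hb]
      cases hcc : acc.contains s with
      | false =>
        have hts : tableStep acc r = acc.insert s (repOf r) := by
          rw [hstep, he, if_pos ⟨hs, hcc⟩]
        have hnone : acc.get? s = none := (PySem.Dict.get?_eq_none_iff_contains acc s).mpr hcc
        rw [hts, PySem.Dict.get?_insert_self, hnone]
        rfl
      | true =>
        have hts : tableStep acc r = acc := by
          rw [hstep, he, if_neg]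
          rintro ⟨-, hfc⟩
          rw [hcc] at hfc
          cases hfc
        obtain ⟨v, hv⟩ : ∃ v, acc.get? s = some v := by
          apply Option.isSome_iff_exists.mp
          rw [← PySem.Dict.contains_eq_isSome_get?]
          exact hcc
        rw [hts, hv]
    · have hb : (eOf r == s) = false := by simp [he]
      rw [hb]
      have hgs : (tableStep acc r).get? s = acc.get? s := by
        rw [hstep]
        split_ifs with hc
        · exact PySem.Dict.get?_insert_of_ne acc _ (fun hh => he hh.symm)
        · rfl
      rw [hgs]

-- the length-k suffix of word, as B's loop computes it
def sfx (word : String) (k : Nat) : String :=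
  PySem.Str.slice word (some (-(k : Int))) none

theorem str_ne_empty_iff (s : String) : s ≠ "" ↔ s.toList ≠ [] := by
  constructor
  · intro h hc
    exact h (String.toList_inj.mp (by simpa using hc))
  · intro h hc
    subst hc
    simp at h

theorem sfx_toList (word : String) {k : Nat} (hk : 0 < k) :
    (sfx word k).toList = word.toList.drop (word.toList.length - k) := by
  rw [sfx, PySem.Str.toList_slice, PySem.Chars.slice_eq_listSlice,
    PySem.List.slice_from_neg_natCast _ k hk]

theorem sfx_length (word : String) {k : Nat} (hk1 : 1 ≤ k) (hkn : k ≤ word.toList.length) :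
    (sfx word k).toList.length = k := by
  rw [sfx_toList word (by omega), List.length_drop]
  omega

theorem sfx_ne_empty (word : String) {k : Nat} (hk1 : 1 ≤ k) (hkn : k ≤ word.toList.length) :
    sfx word k ≠ "" := by
  rw [str_ne_empty_iff]
  intro hc
  have := sfx_length word hk1 hkn
  rw [hc] at this
  simp at this
  omega

-- on suffix lengths 1 ≤ m ≤ |word|: "matches with key m" is "ends_with equals the length-m suffix"
theorem pred2_eq (word : String) (m : Nat) (hm1 : 1 ≤ m) (hmn : m ≤ word.toList.length)
    (r : List (String × String)) :
    (predB word r && (keyI r == (m : Int))) = (eOf r == sfx word m) := by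
  have hsfxL : (sfx word m).toList = word.toList.drop (word.toList.length - m) :=
    sfx_toList word (by omega)
  have hlen : (sfx word m).toList.length = m := sfx_length word hm1 hmn
  by_cases h : eOf r = sfx word m
  · have h1 : eOf r ≠ "" := by
      rw [h, str_ne_empty_iff]
      intro hc
      rw [hc] at hlen
      simp at hlen
      omega
    have h2 : PySem.Str.endswith word (eOf r) = true := by
      show PySem.Chars.endswith word.toList (eOf r).toList = true
      rw [PySem.Chars.endswith_iff, h, hsfxL]
      exact List.drop_suffix _ _
    have h3 : keyI r = (m : Int) := by
      rw [keyI, PySem.Str.len, h, hlen]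
    have hp : predB word r = true := by
      rw [predB, decide_eq_true_eq]
      exact ⟨h1, h2⟩
    simp [hp, h3, h]
  · have hb : (eOf r == sfx word m) = false := by simp [h]
    rw [hb]
    by_cases hp : predB word r = true
    · by_cases hk : keyI r = (m : Int)
      · exfalso
        apply h
        rw [predB, decide_eq_true_eq] at hp
        have hsuf : (eOf r).toList <:+ word.toList :=
          (PySem.Chars.endswith_iff _ _).mp hp.2
        have hlenr : (eOf r).toList.length = m := by
          rw [keyI, PySem.Str.len] at hk
          exact_mod_cast hk
        obtain ⟨t, ht⟩ := hsuf
        apply String.toList_inj.mp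
        rw [hsfxL, ← ht]
        have hwl : (t ++ (eOf r).toList).length - m = t.length := by
          simp [hlenr]
        rw [hwl, List.drop_left]
      · simp [hp, hk]
    · rw [Bool.not_eq_true] at hp
      simp [hp]

theorem exists_max_nat (l : List Nat) (h : l ≠ []) : ∃ m ∈ l, ∀ a ∈ l, a ≤ m := by
  induction l with
  | nil => exact absurd rfl h
  | cons x t ih =>
    cases t with
    | nil =>
      refine ⟨x, List.mem_cons_self, ?_⟩
      intro a ha
      rcases List.mem_cons.mp ha with rfl | ha'
      · exact le_rfl
      · cases ha'
    | cons y s =>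
      obtain ⟨m, hm, hb⟩ := ih (by simp)
      by_cases hxm : x ≤ m
      · refine ⟨m, List.mem_cons_of_mem _ hm, ?_⟩
        intro a ha
        rcases List.mem_cons.mp ha with rfl | ha'
        · exact hxm
        · exact hb a ha'
      · refine ⟨x, List.mem_cons_self, ?_⟩
        intro a ha
        rcases List.mem_cons.mp ha with rfl | ha'
        · exact le_rfl
        · exact le_trans (hb a ha') (by omega)

-- ===== VERDICT (by name: the statement is the Claim_ definition above) =====
theorem apply_suffix_rules_py_spec : Claim_equal_apply_suffix_rules_py := by
  intro word rules _
  show apply_suffix_rules_py word rules = apply_suffix_rules_py_alt word rules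
  have hgoal :
      apply_suffix_rules_py word rules = applyLoopA word (PySem.List.sorted rules keyI true) :=
    rfl
  have hgoal' :
      apply_suffix_rules_py_alt word rules =
        loopB word (rules.foldl tableStep PySem.Dict.empty)
          (min (PySem.Str.len word)
            (match PySem.List.max?
                (((rules.foldl tableStep PySem.Dict.empty).keys).map PySem.Str.len)
                (fun x => x) with
              | some v => v
              | none => 0)).toNat := rfl
  rw [hgoal, hgoal', loopA_eq_find]
  set n := word.toList.length with hn
  set table := rules.foldl tableStep PySem.Dict.empty with htab
  set maxlen : Int :=
    (match PySem.List.max? (table.keys.map PySem.Str.len) (fun x => x) with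
      | some v => v
      | none => 0) with hml
  set k0 : Nat := (min (PySem.Str.len word) maxlen).toNat with hk0
  have hk0n : k0 ≤ n := by
    have h1 : min (PySem.Str.len word) maxlen ≤ (n : Int) := by
      rw [hn, ← PySem.Str.len]
      exact min_le_left _ _
    rw [hk0]
    omega
  set S := PySem.List.sorted rules keyI true with hS
  cases hfind : S.find? (predB word) with
  | none =>
    have hall : ∀ r ∈ rules, predB word r = false := by
      intro r hr
      have := List.find?_eq_none.mp hfind r ((PySem.List.mem_sorted rules keyI true r).mpr hr)
      simpa using this
    suffices hk : ∀ k, k ≤ n → loopB word table k = word by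
      exact (hk k0 hk0n).symm
    intro k
    induction k with
    | zero => intro _; rfl
    | succ k ih =>
      intro hkn
      have hsne : sfx word (k + 1) ≠ "" := sfx_ne_empty word (by omega) (by omega)
      have hget : table.get? (sfx word (k + 1)) = none := by
        rw [htab, table_get? rules PySem.Dict.empty _ hsne, PySem.Dict.get?_empty]
        have hfn : rules.find? (fun r => eOf r == sfx word (k + 1)) = none := by
          rw [List.find?_eq_none]
          intro r hr hbe
          have hp2 : (predB word r && (keyI r == ((k + 1 : Nat) : Int))) = true := by
            rw [pred2_eq word (k + 1) (by omega) (by omega) r]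
            simpa using hbe
          simp only [Bool.and_eq_true] at hp2
          rw [hall r hr] at hp2
          exact Bool.false_ne_true hp2.1
        rw [hfn]
        rfl
      show (match table.get? (sfx word (k + 1)) with
        | some repl =>
          pyConcat (PySem.Str.slice word none (some (-((k + 1 : Nat) : Int)))) repl
        | none => loopB word table k) = word
      rw [hget]
      exact ih (by omega)
  | some rstar =>
    have hrsS : rstar ∈ S := List.mem_of_find?_eq_some hfind
    have hrs_rules : rstar ∈ rules := (PySem.List.mem_sorted rules keyI true rstar).mp hrsS
    have hprs : predB word rstar = true := List.find?_some hfind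
    -- the maximal matching suffix length m
    obtain ⟨m, hmL, hmax⟩ :=
      exists_max_nat ((rules.filter (predB word)).map (fun r => (eOf r).toList.length))
        (List.ne_nil_of_mem
          (List.mem_map_of_mem (List.mem_filter.mpr ⟨hrs_rules, hprs⟩)))
    obtain ⟨rm, hrmf, hrmlen⟩ := List.mem_map.mp hmL
    have hrm_rules : rm ∈ rules := (List.mem_filter.mp hrmf).1
    have hprm : predB word rm = true := (List.mem_filter.mp hrmf).2
    have hm1 : 1 ≤ m := by
      rw [predB, decide_eq_true_eq] at hprm
      have : (eOf rm).toList ≠ [] := (str_ne_empty_iff _).mp hprm.1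
      have := List.length_pos_iff.mpr this
      omega
    have hmn : m ≤ n := by
      rw [predB, decide_eq_true_eq] at hprm
      have hsuf : (eOf rm).toList <:+ word.toList := (PySem.Chars.endswith_iff _ _).mp hprm.2
      have := hsuf.length_le
      omega
    have hboundS : ∀ x ∈ S, predB word x = true → keyI x ≤ (m : Int) := by
      intro x hx hpx
      have hxr : x ∈ rules := (PySem.List.mem_sorted rules keyI true x).mp hx
      have : (eOf x).toList.length ≤ m :=
        hmax _ (List.mem_map_of_mem (List.mem_filter.mpr ⟨hxr, hpx⟩))
      rw [keyI, PySem.Str.len]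
      exact_mod_cast this
    have hexS : ∃ x ∈ S, predB word x = true ∧ keyI x = (m : Int) := by
      refine ⟨rm, (PySem.List.mem_sorted rules keyI true rm).mpr hrm_rules, hprm, ?_⟩
      rw [keyI, PySem.Str.len, hrmlen]
    -- A's find over the sorted list = find of the length-m suffix over the original list
    have hchain : S.find? (predB word) = rules.find? (fun r => eOf r == sfx word m) := by
      rw [hS, find?_eq_find?_max (predB word) keyI (m : Int) _
            (PySem.List.sorted_pairwise_rev rules keyI) (hS ▸ hboundS) (hS ▸ hexS),
          find?_eq_find?_filter _ (fun y => keyI y == (m : Int)) _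
            (fun x hx => by
              simp only [Bool.and_eq_true] at hx
              exact hx.2),
          filter_sorted_rev keyI (m : Int) rules,
          ← find?_eq_find?_filter _ (fun y => keyI y == (m : Int)) _
            (fun x hx => by
              simp only [Bool.and_eq_true] at hx
              exact hx.2)]
      rw [funext (pred2_eq word m hm1 hmn)]
    have hfind' : rules.find? (fun r => eOf r == sfx word m) = some rstar := by
      rw [← hchain]
      exact hfind
    have hestar : eOf rstar = sfx word m := by
      have := List.find?_some hfind'
      simpa using this
    have hlenstar : (eOf rstar).toList.length = m := by
      rw [hestar]
      exact sfx_length word hm1 hmn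
    have hsne : sfx word m ≠ "" := sfx_ne_empty word hm1 hmn
    have htget : table.get? (sfx word m) = some (repOf rstar) := by
      rw [htab, table_get? rules PySem.Dict.empty _ hsne, PySem.Dict.get?_empty, hfind']
      rfl
    have hmk0 : m ≤ k0 := by
      have hmem : sfx word m ∈ table.keys := by
        apply (PySem.Dict.contains_iff_mem_keys _ _).mp
        rw [PySem.Dict.contains_eq_isSome_get?, htget]
        rfl
      have hmlen : PySem.Str.len (sfx word m) ∈ table.keys.map PySem.Str.len :=
        List.mem_map_of_mem hmem
      have hlm : (m : Int) ≤ maxlen := by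
        rw [hml]
        cases hmx : PySem.List.max? (table.keys.map PySem.Str.len) (fun x => x) with
        | none =>
          rw [PySem.List.max?_eq_none_iff] at hmx
          rw [hmx] at hmlen
          cases hmlen
        | some v =>
          have := PySem.List.max?_isMax hmx _ hmlen
          have hms : PySem.Str.len (sfx word m) = (m : Int) := by
            rw [PySem.Str.len, sfx_length word hm1 hmn]
          rw [hms] at this
          exact this
      rw [hk0]
      have h1 : (m : Int) ≤ min (PySem.Str.len word) maxlen := by
        apply le_min _ hlm
        rw [PySem.Str.len]
        exact_mod_cast hmn
      omega
    suffices hloop : ∀ k, m ≤ k → k ≤ n →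
        loopB word table k =
          pyConcat (PySem.Str.slice word none (some (-(m : Int)))) (repOf rstar) by
      have hres := hloop k0 hmk0 hk0n
      rw [hres]
      show pyConcat (PySem.Str.slice word none (some (-(PySem.Str.len (eOf rstar)))))
          (repOf rstar) =
        pyConcat (PySem.Str.slice word none (some (-(m : Int)))) (repOf rstar)
      have hint : PySem.Str.len (eOf rstar) = (m : Int) := by
        rw [PySem.Str.len, hlenstar]
      rw [hint]
    intro k
    induction k with
    | zero =>
      intro hm0 _
      omega
    | succ k ih =>
      intro hmk hkn
      show (match table.get? (sfx word (k + 1)) with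
        | some repl =>
          pyConcat (PySem.Str.slice word none (some (-((k + 1 : Nat) : Int)))) repl
        | none => loopB word table k) =
          pyConcat (PySem.Str.slice word none (some (-(m : Int)))) (repOf rstar)
      by_cases hmk1 : m = k + 1
      · rw [← hmk1, htget]
      · have hnone : table.get? (sfx word (k + 1)) = none := by
          rw [htab, table_get? rules PySem.Dict.empty _ (sfx_ne_empty word (by omega) hkn),
            PySem.Dict.get?_empty]
          have hfn : rules.find? (fun r => eOf r == sfx word (k + 1)) = none := by
            rw [List.find?_eq_none]
            intro r hr hbe
            have hp2 : (predB word r && (keyI r == ((k + 1 : Nat) : Int))) = true := by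
              rw [pred2_eq word (k + 1) (by omega) hkn r]
              simpa using hbe
            simp only [Bool.and_eq_true] at hp2
            have hb1 := hboundS r ((PySem.List.mem_sorted rules keyI true r).mpr hr) hp2.1
            have hb2 : keyI r = ((k + 1 : Nat) : Int) := by simpa using hp2.2
            rw [hb2] at hb1
            have : (k + 1 : Nat) ≤ m := by exact_mod_cast hb1
            omega
          rw [hfn]
          rfl
        rw [hnone]
        exact ih (by omega) (by omega)
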